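-- pv_equiv track=rewrite | github.com/RyannDaGreat/rp | rp_ptpython/selection_utils.py | get_line_spans
-- ===== SOURCE A (Python) =====
-- from typing import List, Tuple, Optional, Set
--
-- Span = Tuple[int, int]
--
-- def get_line_spans(code: str) -> Set[Span]:
--     """Spans for each non-empty line (with and without leading indent)."""
--     spans, offset = set(), 0
--     for line in code.split('\n'):
--         if line.strip():
--             spans.add((offset, offset + len(line)))  # Full line with indent
--             indent = len(line) - len(line.lstrip())
--             if indent:
--                 spans.add((offset + indent, offset + len(line)))  # Without indent
--         offset += len(line) + 1
--     return spans
-- ===== SOURCE B (Python) =====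
-- def get_line_spans(code):
--     """Spans for each non-empty line (with and without leading indent).
--
--     Character-level state machine: scan code + '\n' once, tracking the current
--     line's start and the index of its first non-whitespace character, and emit
--     the spans at each newline. No split(), no per-line strip/lstrip/len.
--     """
--     spans = set()
--     line_start = 0
--     first_nonws = None
--     for i, ch in enumerate(code + '\n'):
--         if ch == '\n':
--             if first_nonws is not None:
--                 spans.add((line_start, i))
--                 if first_nonws > line_start:
--                     spans.add((first_nonws, i))
--             line_start = i + 1
--             first_nonws = None
--         elif first_nonws is None and not ch.isspace():
--             first_nonws = i
--     return spans
-- ===== Notes on version B (the rewrite author's own statement) =====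
-- stated objective: alternative
-- what changed: B replaces A's split('\n') loop with its per-line strip/lstrip/len calls by a single character-level state machine over code+'\n' that tracks the current line start and the index of the first non-whitespace character and emits both spans at each newline.
import Mathlib
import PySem

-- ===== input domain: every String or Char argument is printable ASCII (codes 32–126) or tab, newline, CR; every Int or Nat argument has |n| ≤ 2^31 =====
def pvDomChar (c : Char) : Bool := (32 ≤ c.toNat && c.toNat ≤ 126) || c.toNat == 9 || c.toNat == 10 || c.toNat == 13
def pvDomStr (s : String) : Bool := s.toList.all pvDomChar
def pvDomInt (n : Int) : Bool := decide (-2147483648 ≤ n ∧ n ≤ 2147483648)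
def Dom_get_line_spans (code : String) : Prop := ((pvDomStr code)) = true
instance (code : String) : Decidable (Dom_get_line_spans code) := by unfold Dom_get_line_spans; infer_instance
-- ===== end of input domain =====

-- B replaces A's split('\n') + per-line strip/lstrip loop by a single character-level
-- state machine over code + '\n' (objective: alternative algorithm, same cost).

-- ===== PORT A =====
def get_line_spans (code : String) : List (Int × Int) :=
  (((PySem.Chars.splitOn code.toList ['\n']).foldl
    (fun (st : PySem.Set (Int × Int) × Int) line =>
      let spans :=
        if PySem.Chars.strip line ≠ [] then
          let spans := PySem.Set.add st.1 (st.2, st.2 + (line.length : Int))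
          let indent : Int := (line.length : Int) - ((PySem.Chars.lstrip line).length : Int)
          if indent ≠ 0 then PySem.Set.add spans (st.2 + indent, st.2 + (line.length : Int))
          else spans
        else st.1
      (spans, st.2 + (line.length : Int) + 1))
    (PySem.Set.empty, 0)).1)

-- ===== PORT B =====
def get_line_spans_alt (code : String) : List (Int × Int) :=
  ((PySem.List.enumerate (code.toList ++ ['\n']) 0).foldl
    (fun (st : PySem.Set (Int × Int) × Int × Option Int) p =>
      if p.2 == '\n' then
        let spans :=
          match st.2.2 with
          | none => st.1
          | some f =>
            let spans := PySem.Set.add st.1 (st.2.1, p.1)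
            if f > st.2.1 then PySem.Set.add spans (f, p.1) else spans
        (spans, p.1 + 1, none)
      else if st.2.2.isNone && !(PySem.Chars.isspace p.2) then
        (st.1, st.2.1, some p.1)
      else st)
    (PySem.Set.empty, 0, none)).1

-- ===== PRECONDITION & SPEC =====
def Spec_get_line_spans (code : String) (out : List (Int × Int)) : Prop := out = get_line_spans_alt code
instance (code : String) (out : List (Int × Int)) : Decidable (Spec_get_line_spans code out) := by unfold Spec_get_line_spans; infer_instance

-- ===== CLAIM (what is proved, stated in full; the proofs are below) =====
def Claim_equal_get_line_spans : Prop := ∀ (code : String), Dom_get_line_spans code → Spec_get_line_spans code (get_line_spans code)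

-- ===== LEMMAS AND PROOFS =====

def pvConsHead (p : List Char) : List (List Char) → List (List Char)
  | [] => [p]
  | x :: xs => (p ++ x) :: xs
def pvSplit : List Char → List (List Char)
  | [] => [[]]
  | c :: r => if c = '\n' then [] :: pvSplit r else pvConsHead [c] (pvSplit r)
lemma pvSplit_ne_nil (xs : List Char) : pvSplit xs ≠ [] := by
  cases xs with
  | nil => simp [pvSplit]
  | cons c r =>
    simp only [pvSplit]
    split_ifs
    · simp
    · cases h : pvSplit r with
      | nil => simp [pvConsHead]
      | cons x xs => simp [pvConsHead]
lemma pvConsHead_nil (m : List (List Char)) (h : m ≠ []) : pvConsHead [] m = m := by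
  cases m with
  | nil => exact absurd rfl h
  | cons x xs => simp [pvConsHead]
lemma pvConsHead_comp (a b : List Char) (m : List (List Char)) :
    pvConsHead a (pvConsHead b m) = pvConsHead (a ++ b) m := by
  cases m <;> simp [pvConsHead]
lemma pvGo (fuel : Nat) : ∀ (l cur : List Char) (acc : List (List Char)), l.length ≤ fuel →
    PySem.Chars.splitOn.go ['\n'] fuel l cur acc
      = acc.reverse ++ pvConsHead cur.reverse (pvSplit l) := by
  induction fuel with
  | zero =>
    intro l cur acc h
    interval_cases hl : l.length
    rw [List.length_eq_zero_iff] at hl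
    subst hl
    rw [PySem.Chars.splitOn.go]
    simp [pvSplit, pvConsHead]
  | succ fuel ih =>
    intro l cur acc h
    cases l with
    | nil =>
      rw [PySem.Chars.splitOn.go]
      · simp [pvSplit, pvConsHead]
      · simp
    | cons c rest =>
      rw [PySem.Chars.splitOn.go]
      by_cases hc : c = '\n'
      · subst hc
        have hp : List.isPrefixOf ['\n'] ('\n'::rest) = true := by simp [List.isPrefixOf]
        rw [if_pos hp]
        simp only [List.length_cons] at h
        rw [ih _ _ _ (by simpa using Nat.lt_succ_iff.mp (Nat.lt_of_lt_of_le (Nat.lt_succ_self _) h))]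
        simp [pvSplit, pvConsHead]
        cases hsr : pvSplit rest with
        | nil => exact absurd hsr (pvSplit_ne_nil rest)
        | cons x xs => rfl
      · have hp : List.isPrefixOf ['\n'] (c::rest) = false := by
          simp [List.isPrefixOf]
          exact fun he => absurd he.symm hc
        rw [if_neg (by simp [hp])]
        simp only [List.length_cons] at h
        rw [ih _ _ _ (by omega)]
        simp [pvSplit, hc, pvConsHead_comp]


lemma pvSplit_eq (xs : List Char) : PySem.Chars.splitOn xs ['\n'] = pvSplit xs := by
  unfold PySem.Chars.splitOn
  rw [pvGo _ _ _ _ (by omega)]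
  simp [pvConsHead_nil _ (pvSplit_ne_nil xs)]

lemma pvFlat (xs : List Char) :
    xs ++ ['\n'] = (pvSplit xs).flatMap (fun l => l ++ ['\n']) := by
  induction xs with
  | nil => simp [pvSplit]
  | cons c r ih =>
    simp only [pvSplit]
    by_cases hc : c = '\n'
    · subst hc; simp [← ih]
    · rw [if_neg hc]
      cases hsr : pvSplit r with
      | nil => exact absurd hsr (pvSplit_ne_nil r)
      | cons x xs =>
        rw [hsr] at ih
        simp only [pvConsHead, List.flatMap_cons, List.cons_append, List.nil_append]
        simp only [List.flatMap_cons] at ih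
        rw [ih]

lemma pvNoNl (xs : List Char) : ∀ l ∈ pvSplit xs, '\n' ∉ l := by
  induction xs with
  | nil => simp [pvSplit]
  | cons c r ih =>
    simp only [pvSplit]
    by_cases hc : c = '\n'
    · subst hc; simpa using ih
    · rw [if_neg hc]
      cases hsr : pvSplit r with
      | nil => exact absurd hsr (pvSplit_ne_nil r)
      | cons x xs =>
        rw [hsr] at ih
        intro l hl
        simp [pvConsHead] at hl
        rcases hl with rfl | hl
        · intro hm
          rcases List.mem_cons.mp hm with h1 | h2
          · exact hc h1.symm
          · exact ih x (by simp) h2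
        · exact ih l (by simp [hl])

def pvStep (spans : PySem.Set (Int × Int)) (off : Int) (line : List Char) : PySem.Set (Int × Int) :=
  if PySem.Chars.strip line ≠ [] then
    let spans := PySem.Set.add spans (off, off + (line.length : Int))
    let indent : Int := (line.length : Int) - ((PySem.Chars.lstrip line).length : Int)
    if indent ≠ 0 then PySem.Set.add spans (off + indent, off + (line.length : Int)) else spans
  else spans

def pvStepB (st : PySem.Set (Int × Int) × Int × Option Int) (p : Int × Char) :
    PySem.Set (Int × Int) × Int × Option Int :=
  if p.2 == '\n' then
    let spans :=
      match st.2.2 with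
      | none => st.1
      | some f =>
        let spans := PySem.Set.add st.1 (st.2.1, p.1)
        if f > st.2.1 then PySem.Set.add spans (f, p.1) else spans
    (spans, p.1 + 1, none)
  else if st.2.2.isNone && !(PySem.Chars.isspace p.2) then
    (st.1, st.2.1, some p.1)
  else st

def pvNext (first : Option Int) (line : List Char) (i : Int) : Option Int :=
  match first with
  | some f => some f
  | none =>
    if PySem.Chars.lstrip line = [] then none
    else some (i + ((line.length - (PySem.Chars.lstrip line).length : Nat) : Int))

lemma pvLstripLe (line : List Char) : (PySem.Chars.lstrip line).length ≤ line.length :=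
  List.length_dropWhile_le _ _

lemma pvStripNil (line : List Char) (h : PySem.Chars.lstrip line = []) :
    PySem.Chars.strip line = [] := by
  simp [PySem.Chars.strip, h, PySem.Chars.rstrip]

lemma pvStripNeNil (line : List Char) (h : PySem.Chars.lstrip line ≠ []) :
    PySem.Chars.strip line ≠ [] := by
  intro hs
  unfold PySem.Chars.strip PySem.Chars.rstrip at hs
  rw [List.reverse_eq_nil_iff, List.dropWhile_eq_nil_iff] at hs
  have hne : List.dropWhile PySem.Chars.isspace line ≠ [] := by simpa [PySem.Chars.lstrip] using h
  have hh := List.head_dropWhile_not PySem.Chars.isspace hne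
  have hmem : (List.dropWhile PySem.Chars.isspace line).head hne ∈ (PySem.Chars.lstrip line).reverse := by
    simp only [List.mem_reverse, PySem.Chars.lstrip]
    exact List.head_mem hne
  rw [hs _ hmem] at hh
  exact absurd hh (by decide)

lemma pvScanLine (line : List Char) (h : '\n' ∉ line) :
    ∀ (first : Option Int) (i ls : Int) (spans : PySem.Set (Int × Int)),
    (PySem.List.enumerate line i).foldl pvStepB (spans, ls, first)
      = (spans, ls, pvNext first line i) := by
  induction line with
  | nil => intro first i ls spans; cases first <;> simp [PySem.List.enumerate_nil, pvNext, PySem.Chars.lstrip]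
  | cons c cs ih =>
    intro first i ls spans
    have hc : (c == '\n') = false := by
      simp only [List.mem_cons, not_or] at h
      exact beq_eq_false_iff_ne.mpr (fun he => h.1 he.symm)
    have hcs : '\n' ∉ cs := by simp only [List.mem_cons, not_or] at h; exact h.2
    rw [PySem.List.enumerate_cons, List.foldl_cons]
    cases first with
    | some f =>
      have : pvStepB (spans, ls, some f) (i, c) = (spans, ls, some f) := by
        simp [pvStepB, hc]
      rw [this, ih hcs]
      simp [pvNext]
    | none =>
      by_cases hsp : PySem.Chars.isspace c = true
      · have : pvStepB (spans, ls, none) (i, c) = (spans, ls, none) := by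
          simp [pvStepB, hc, hsp]
        rw [this, ih hcs]
        simp only [pvNext, PySem.Chars.lstrip, List.dropWhile_cons_of_pos hsp, List.length_cons]
        have hle := pvLstripLe cs
        by_cases he : List.dropWhile PySem.Chars.isspace cs = []
        · simp [he]
        · simp only [PySem.Chars.lstrip] at hle ⊢
          simp only [if_neg he]
          simp only [Prod.mk.injEq, Option.some.injEq, true_and]
          omega
      · have : pvStepB (spans, ls, none) (i, c) = (spans, ls, some i) := by
          simp [pvStepB, hc, hsp]
        rw [this, ih hcs]
        simp [pvNext, PySem.Chars.lstrip, List.dropWhile_cons_of_neg hsp]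

lemma pvEmit (spans : PySem.Set (Int × Int)) (i : Int) (line : List Char) :
    pvStepB (spans, i, pvNext none line i) (i + (line.length : Int), '\n')
      = (pvStep spans i line, i + (line.length : Int) + 1, none) := by
  by_cases he : PySem.Chars.lstrip line = []
  · simp [pvStepB, pvNext, he, pvStep, pvStripNil line he]
  · have hle := pvLstripLe line
    simp only [pvNext, if_neg he, pvStepB, beq_self_eq_true, if_pos,
      pvStep, ne_eq, if_pos (pvStripNeNil line he)]
    by_cases hz : line.length = (PySem.Chars.lstrip line).length
    · have h1 : ¬ (i + ((line.length - (PySem.Chars.lstrip line).length : Nat) : Int) > i) := by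
        omega
      have h2 : ¬ ((line.length : Int) - ((PySem.Chars.lstrip line).length : Int) ≠ 0) := by
        omega
      rw [if_neg h1, if_neg h2]
    · have h1 : i + ((line.length - (PySem.Chars.lstrip line).length : Nat) : Int) > i := by
        omega
      have h2 : (line.length : Int) - ((PySem.Chars.lstrip line).length : Int) ≠ 0 := by
        omega
      rw [if_pos h1, if_pos h2]
      have hind : i + ((line.length - (PySem.Chars.lstrip line).length : Nat) : Int)
          = i + ((line.length : Int) - ((PySem.Chars.lstrip line).length : Int)) := by
        omega
      rw [hind]

lemma pvLines (lines : List (List Char)) (h : ∀ l ∈ lines, '\n' ∉ l) :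
    ∀ (i : Int) (spans : PySem.Set (Int × Int)),
    (PySem.List.enumerate (lines.flatMap (fun l => l ++ ['\n'])) i).foldl pvStepB (spans, i, none)
      = ((lines.foldl (fun st l => (pvStep st.1 st.2 l, st.2 + (l.length : Int) + 1)) (spans, i)).1,
         (lines.foldl (fun st l => (pvStep st.1 st.2 l, st.2 + (l.length : Int) + 1)) (spans, i)).2,
         none) := by
  induction lines with
  | nil => intro i spans; simp [PySem.List.enumerate_nil]
  | cons l rest ih =>
    intro i spans
    simp only [List.flatMap_cons, List.mem_cons] at *
    rw [PySem.List.enumerate_append, List.foldl_append,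
        PySem.List.enumerate_append, List.foldl_append,
        pvScanLine l (h l (Or.inl rfl)) none i i spans,
        PySem.List.enumerate_cons, PySem.List.enumerate_nil]
    simp only [List.foldl_cons, List.foldl_nil]
    rw [pvEmit]
    have hstart : i + (l.length : Int) + 1 = i + ((l ++ ['\n']).length : Int) := by
      simp; omega
    rw [hstart, ih (fun x hx => h x (Or.inr hx))]

-- ===== VERDICT (by name: the statement is the Claim_ definition above) =====
theorem get_line_spans_spec : Claim_equal_get_line_spans := by
  intro code _
  show get_line_spans code = get_line_spans_alt code
  unfold get_line_spans get_line_spans_alt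
  have hA : (fun (st : PySem.Set (Int × Int) × Int) (line : List Char) =>
      let spans :=
        if PySem.Chars.strip line ≠ [] then
          let spans := PySem.Set.add st.1 (st.2, st.2 + (line.length : Int))
          let indent : Int := (line.length : Int) - ((PySem.Chars.lstrip line).length : Int)
          if indent ≠ 0 then PySem.Set.add spans (st.2 + indent, st.2 + (line.length : Int))
          else spans
        else st.1
      (spans, st.2 + (line.length : Int) + 1))
      = (fun st l => (pvStep st.1 st.2 l, st.2 + (l.length : Int) + 1)) := rfl
  have hB : (fun (st : PySem.Set (Int × Int) × Int × Option Int) (p : Int × Char) =>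
      if p.2 == '\n' then
        let spans :=
          match st.2.2 with
          | none => st.1
          | some f =>
            let spans := PySem.Set.add st.1 (st.2.1, p.1)
            if f > st.2.1 then PySem.Set.add spans (f, p.1) else spans
        (spans, p.1 + 1, none)
      else if st.2.2.isNone && !(PySem.Chars.isspace p.2) then
        (st.1, st.2.1, some p.1)
      else st) = pvStepB := rfl
  rw [hA, hB, pvSplit_eq, pvFlat code.toList, pvLines _ (pvNoNl _)]
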